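-- pv_equiv track=rewrite | github.com/EricWangyz/Exercises | Exam4Job/ZTE/字符串列表按需输出0909.py | wordOutput
-- ===== SOURCE A (Python) =====
-- def wordOutput(numsWord, wordsList, numsMethod, methodsList):
--
--     result = []
--     for i in methodsList:
--         if i == 1:
--             result.append(maxWord(wordsList))
--
--         elif i == 2:
--             result.append(minWord(wordsList))
--
--         elif i == 3:
--             result.append(secondMaxWord(wordsList))
--
--         elif i == 4:
--             result.append(secondMinWord(wordsList))
--
--         elif i == 5:
--             result.append(reversedMaxWord(wordsList))
--
--     return result
--
-- def maxWord(wordsList):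
--     chr2num = []
--     for word in wordsList:
--         chr2num.append(ord(word[0]))
--     maxIdx = chr2num.index(max(chr2num))
--     return wordsList[maxIdx]
--
-- def minWord(wordsList):
--     chr2num = []
--     for word in wordsList:
--         chr2num.append(ord(word[0]))
--     minIdx = chr2num.index(min(chr2num))
--     return wordsList[minIdx]
--
-- def secondMaxWord(wordsList):
--     chr2num = []
--     for word in wordsList:
--         chr2num.append(ord(word[0]))
--     maxIdx = chr2num.index(max(chr2num))
--     chr2num[maxIdx] = 0
--     secondMaxIdx = chr2num.index(max(chr2num))
--     return wordsList[secondMaxIdx]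
--
-- def secondMinWord(wordsList):
--     chr2num = []
--     for word in wordsList:
--         chr2num.append(ord(word[0]))
--     minIdx = chr2num.index(min(chr2num))
--     chr2num[minIdx] = len(wordsList) + 2
--     secondMinIdx = chr2num.index(min(chr2num))
--     return wordsList[secondMinIdx]
--
-- def reversedMaxWord(wordsList):
--     newWordsList = []
--     for word in wordsList:
--         newWordsList.append(word[::-1])
--
--     chr2num = []
--     for word in newWordsList:
--         chr2num.append(ord(word[0]))
--     maxIdx = newWordsList.index(max(chr2num))
--     return newWordsList[maxIdx]
-- ===== SOURCE B (Python) =====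
-- # One pass over methodsList with a per-method cache: each of the five
-- # selections is computed at most once, by a single running-best index pass.
--
-- def _arg(keys, takemax):
--     # index of the first maximal (or minimal) element, one running-best pass
--     best, bestVal = 0, keys[0]
--     for j in range(1, len(keys)):
--         k = keys[j]
--         if (k > bestVal) if takemax else (k < bestVal):
--             best, bestVal = j, k
--     return best
--
-- def _select(m, ws):
--     if m == 5:
--         rs = [w[::-1] for w in ws]
--         return max(rs, key=lambda w: ord(w[0]))
--     keys = [ord(w[0]) for w in ws]
--     if m == 3:
--         keys[_arg(keys, True)] = 0
--     elif m == 4: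
--         keys[_arg(keys, False)] = len(ws) + 2
--     return ws[_arg(keys, m in (1, 3))]
--
-- def wordOutput(numsWord, wordsList, numsMethod, methodsList):
--     cache = {}
--     result = []
--     for m in methodsList:
--         if 1 <= m <= 5:
--             if m not in cache:
--                 cache[m] = _select(m, wordsList)
--             result.append(cache[m])
--     return result
-- ===== Notes on version B (the rewrite author's own statement) =====
-- stated objective: alternative
-- what changed: B memoises each of the five possible selections in a dict so every method is computed at most once per call, and each selection is a single running-best index pass instead of A's build-list/max/index triple scan.
import Mathlib
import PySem

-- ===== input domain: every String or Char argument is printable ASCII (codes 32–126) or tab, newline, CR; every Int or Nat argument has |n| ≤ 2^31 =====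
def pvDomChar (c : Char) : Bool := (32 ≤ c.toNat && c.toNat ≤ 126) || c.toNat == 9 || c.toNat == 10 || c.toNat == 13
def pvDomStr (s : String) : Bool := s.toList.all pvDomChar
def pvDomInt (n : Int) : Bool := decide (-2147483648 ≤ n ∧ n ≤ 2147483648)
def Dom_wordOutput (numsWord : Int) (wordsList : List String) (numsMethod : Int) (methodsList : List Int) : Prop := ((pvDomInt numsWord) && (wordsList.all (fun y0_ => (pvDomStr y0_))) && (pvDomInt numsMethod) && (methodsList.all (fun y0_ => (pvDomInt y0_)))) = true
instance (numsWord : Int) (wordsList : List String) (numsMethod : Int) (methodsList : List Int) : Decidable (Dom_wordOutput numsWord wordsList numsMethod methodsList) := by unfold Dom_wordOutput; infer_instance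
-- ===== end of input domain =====

-- B memoises each method's selection in a dict (computed at most once) and finds each
-- extremal index with a single running-best pass; A rescans the word list per method.


-- ===== PORT A =====
-- ord(word[0]); pyGet? = none is Python's IndexError on an empty word (excluded by Pre_)
def pvOrdFirst (w : String) : Int := (((PySem.Str.pyGet? w 0).getD ' ').toNat : Int)

def pvMaxWordA (ws : List String) : String :=
  let chr2num := ws.foldl (fun acc w => acc ++ [pvOrdFirst w]) []
  let m := (PySem.List.max? chr2num (fun x => x)).getD 0
  let maxIdx := (PySem.List.index? chr2num m).getD 0
  (PySem.List.pyGet? ws (maxIdx : Int)).getD ""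

def pvMinWordA (ws : List String) : String :=
  let chr2num := ws.foldl (fun acc w => acc ++ [pvOrdFirst w]) []
  let m := (PySem.List.min? chr2num (fun x => x)).getD 0
  let minIdx := (PySem.List.index? chr2num m).getD 0
  (PySem.List.pyGet? ws (minIdx : Int)).getD ""

def pvSecondMaxWordA (ws : List String) : String :=
  let chr2num := ws.foldl (fun acc w => acc ++ [pvOrdFirst w]) []
  let m1 := (PySem.List.max? chr2num (fun x => x)).getD 0
  let maxIdx := (PySem.List.index? chr2num m1).getD 0
  let chr2num := PySem.List.pySetD chr2num (maxIdx : Int) 0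
  let m2 := (PySem.List.max? chr2num (fun x => x)).getD 0
  let secondMaxIdx := (PySem.List.index? chr2num m2).getD 0
  (PySem.List.pyGet? ws (secondMaxIdx : Int)).getD ""

def pvSecondMinWordA (ws : List String) : String :=
  let chr2num := ws.foldl (fun acc w => acc ++ [pvOrdFirst w]) []
  let m1 := (PySem.List.min? chr2num (fun x => x)).getD 0
  let minIdx := (PySem.List.index? chr2num m1).getD 0
  let chr2num := PySem.List.pySetD chr2num (minIdx : Int) (PySem.List.len ws + 2)
  let m2 := (PySem.List.min? chr2num (fun x => x)).getD 0
  let secondMinIdx := (PySem.List.index? chr2num m2).getD 0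
  (PySem.List.pyGet? ws (secondMinIdx : Int)).getD ""

-- newWordsList.index(max(chr2num)) searches a list of STRINGS for an INT: in Python this
-- always raises ValueError (excluded by Pre_); the lookup is ported as none.
def pvReversedMaxWordA (ws : List String) : String :=
  let newWordsList := ws.foldl (fun acc w => acc ++ [(PySem.Str.slice? w none none (-1)).getD ""]) []
  let _chr2num := newWordsList.foldl (fun acc w => acc ++ [pvOrdFirst w]) []
  let maxIdx := (Option.none (α := Nat)).getD 0
  (PySem.List.pyGet? newWordsList (maxIdx : Int)).getD ""

def wordOutput (numsWord : Int) (wordsList : List String) (numsMethod : Int) (methodsList : List Int) : List String :=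
  methodsList.foldl (fun result i =>
    if i = 1 then result ++ [pvMaxWordA wordsList]
    else if i = 2 then result ++ [pvMinWordA wordsList]
    else if i = 3 then result ++ [pvSecondMaxWordA wordsList]
    else if i = 4 then result ++ [pvSecondMinWordA wordsList]
    else if i = 5 then result ++ [pvReversedMaxWordA wordsList]
    else result) []

-- ===== PORT B =====
-- running-best loop of Source B's _arg: state (best index, best value), j the current index
def pvArgGo (takemax : Bool) : List Int → Nat → Nat → Int → Nat
  | [], _, best, _ => best
  | k :: rest, j, best, bestVal =>
      if (if takemax then bestVal < k else k < bestVal)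
      then pvArgGo takemax rest (j + 1) j k
      else pvArgGo takemax rest (j + 1) best bestVal

def pvArg (keys : List Int) (takemax : Bool) : Nat :=
  match keys with
  | [] => 0                       -- Python raises on [] (outside Pre_); loop body untouched
  | k0 :: rest => pvArgGo takemax rest 1 0 k0

def pvSelect (m : Int) (ws : List String) : String :=
  if m = 5 then
    let rs := ws.map (fun w => (PySem.Str.slice? w none none (-1)).getD "")
    (PySem.List.max? rs (fun w => pvOrdFirst w)).getD ""   -- max(rs, key=lambda w: ord(w[0]))
  else
    let keys := ws.map pvOrdFirst
    let keys := if m = 3 then keys.set (pvArg keys true) 0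
                else if m = 4 then keys.set (pvArg keys false) (PySem.List.len ws + 2)
                else keys
    ws.getD (pvArg keys (decide (m = 1 ∨ m = 3))) ""

def wordOutput_alt (numsWord : Int) (wordsList : List String) (numsMethod : Int) (methodsList : List Int) : List String :=
  (methodsList.foldl (fun (st : PySem.Dict Int String × List String) m =>
      if 1 ≤ m ∧ m ≤ 5 then
        let cache := if (st.1.get? m).isSome then st.1 else st.1.insert m (pvSelect m wordsList)
        (cache, st.2 ++ [cache.getD m ""])
      else st) (PySem.Dict.empty, [])).2

-- ===== PRECONDITION & SPEC =====
-- Pre_ excludes exactly the inputs where A raises: any occurrence of method 5 (its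
-- .index of an int in a string list is always a ValueError), and methods 1–4 on an
-- empty word list or with an empty word (max()/word[0] raise there).
def Pre_wordOutput (numsWord : Int) (wordsList : List String) (numsMethod : Int) (methodsList : List Int) : Prop :=
  (5 : Int) ∉ methodsList ∧
  ((∃ i ∈ methodsList, i = 1 ∨ i = 2 ∨ i = 3 ∨ i = 4) → wordsList ≠ [] ∧ ∀ w ∈ wordsList, w ≠ "")
instance (numsWord : Int) (wordsList : List String) (numsMethod : Int) (methodsList : List Int) : Decidable (Pre_wordOutput numsWord wordsList numsMethod methodsList) := by unfold Pre_wordOutput; infer_instance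

def pvWitness_wordOutput : Int × List String × Int × List Int := (2, ["ab", "c"], 3, [1, 2, 4, 2])

def Spec_wordOutput (numsWord : Int) (wordsList : List String) (numsMethod : Int) (methodsList : List Int) (out : List String) : Prop := out = wordOutput_alt numsWord wordsList numsMethod methodsList
instance (numsWord : Int) (wordsList : List String) (numsMethod : Int) (methodsList : List Int) (out : List String) : Decidable (Spec_wordOutput numsWord wordsList numsMethod methodsList out) := by unfold Spec_wordOutput; infer_instance

-- ===== CLAIM (what is proved, stated in full; the proofs are below) =====
def Claim_equal_wordOutput : Prop := ∀ (numsWord : Int) (wordsList : List String) (numsMethod : Int) (methodsList : List Int), Dom_wordOutput numsWord wordsList numsMethod methodsList → Pre_wordOutput numsWord wordsList numsMethod methodsList → Spec_wordOutput numsWord wordsList numsMethod methodsList (wordOutput numsWord wordsList numsMethod methodsList)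

-- ===== LEMMAS AND PROOFS =====

-- the running-best loop finds the first index of the maximum (offset by j)
lemma pvArgGo_max_eq (r : List Int) : ∀ (j b : Nat) (bv : Int),
    pvArgGo true r j b bv =
      if bv < r.foldl max bv then j + (PySem.List.index? r (r.foldl max bv)).getD 0 else b := by
  induction r with
  | nil => intro j b bv; simp [pvArgGo]
  | cons k r ih =>
    intro j b bv
    simp only [pvArgGo, List.foldl_cons]
    by_cases hk : bv < k
    · rw [if_pos (by simpa using hk), ih]
      have hmax : max bv k = k := by omega
      rw [hmax]
      have hle : k ≤ r.foldl max k := (PySem.List.le_foldl_max r k).1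
      by_cases h2 : k < r.foldl max k
      · rw [if_pos h2, if_pos (by omega)]
        rw [PySem.List.index?_cons_of_ne r (by omega : k ≠ r.foldl max k)]
        have hmem : r.foldl max k ∈ r := by
          rcases PySem.List.foldl_max_mem r k with h | h
          · omega
          · exact h
        obtain ⟨n, hn⟩ := Option.isSome_iff_exists.1 ((PySem.List.index?_isSome_iff r _).2 hmem)
        rw [hn]; simp; omega
      · have he : r.foldl max k = k := by omega
        rw [if_neg h2, he, if_pos hk, PySem.List.index?_cons_self]
        simp
    · rw [if_neg (by simpa using hk), ih]
      have hmax : max bv k = bv := by omega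
      rw [hmax]
      by_cases h2 : bv < r.foldl max bv
      · rw [if_pos h2, if_pos h2]
        rw [PySem.List.index?_cons_of_ne r (by omega : k ≠ r.foldl max bv)]
        have hmem : r.foldl max bv ∈ r := by
          rcases PySem.List.foldl_max_mem r bv with h | h
          · omega
          · exact h
        obtain ⟨n, hn⟩ := Option.isSome_iff_exists.1 ((PySem.List.index?_isSome_iff r _).2 hmem)
        rw [hn]; simp; omega
      · rw [if_neg h2, if_neg h2]

-- the mirror statement for the minimum
lemma pvArgGo_min_eq (r : List Int) : ∀ (j b : Nat) (bv : Int),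
    pvArgGo false r j b bv =
      if r.foldl min bv < bv then j + (PySem.List.index? r (r.foldl min bv)).getD 0 else b := by
  induction r with
  | nil => intro j b bv; simp [pvArgGo]
  | cons k r ih =>
    intro j b bv
    simp only [pvArgGo, List.foldl_cons]
    by_cases hk : k < bv
    · rw [if_pos (by simpa using hk), ih]
      have hmin : min bv k = k := by omega
      rw [hmin]
      have hle : r.foldl min k ≤ k := (PySem.List.foldl_min_le r k).1
      by_cases h2 : r.foldl min k < k
      · rw [if_pos h2, if_pos (by omega)]
        rw [PySem.List.index?_cons_of_ne r (by omega : k ≠ r.foldl min k)]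
        have hmem : r.foldl min k ∈ r := by
          rcases PySem.List.foldl_min_mem r k with h | h
          · omega
          · exact h
        obtain ⟨n, hn⟩ := Option.isSome_iff_exists.1 ((PySem.List.index?_isSome_iff r _).2 hmem)
        rw [hn]; simp; omega
      · have he : r.foldl min k = k := by omega
        rw [if_neg h2, he, if_pos hk, PySem.List.index?_cons_self]
        simp
    · rw [if_neg (by simpa using hk), ih]
      have hmin : min bv k = bv := by omega
      rw [hmin]
      by_cases h2 : r.foldl min bv < bv
      · rw [if_pos h2, if_pos h2]
        rw [PySem.List.index?_cons_of_ne r (by omega : k ≠ r.foldl min bv)]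
        have hmem : r.foldl min bv ∈ r := by
          rcases PySem.List.foldl_min_mem r bv with h | h
          · omega
          · exact h
        obtain ⟨n, hn⟩ := Option.isSome_iff_exists.1 ((PySem.List.index?_isSome_iff r _).2 hmem)
        rw [hn]; simp; omega
      · rw [if_neg h2, if_neg h2]

-- A's .index(max(...)) IS B's single-pass argmax
lemma firstMax_eq (ks : List Int) :
    (PySem.List.index? ks ((PySem.List.max? ks (fun x => x)).getD 0)).getD 0 = pvArg ks true := by
  match ks with
  | [] => simp [pvArg, PySem.List.index?]
  | k :: r =>
    rw [PySem.List.max?_id_cons]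
    show (PySem.List.index? (k :: r) (r.foldl max k)).getD 0 = pvArgGo true r 1 0 k
    rw [pvArgGo_max_eq]
    have hle : k ≤ r.foldl max k := (PySem.List.le_foldl_max r k).1
    by_cases h2 : k < r.foldl max k
    · rw [if_pos h2, PySem.List.index?_cons_of_ne r (by omega)]
      have hmem : r.foldl max k ∈ r := by
        rcases PySem.List.foldl_max_mem r k with h | h
        · omega
        · exact h
      obtain ⟨n, hn⟩ := Option.isSome_iff_exists.1 ((PySem.List.index?_isSome_iff r _).2 hmem)
      rw [hn]; simp; omega
    · have he : r.foldl max k = k := by omega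
      rw [if_neg h2, he, PySem.List.index?_cons_self]
      simp

lemma firstMin_eq (ks : List Int) :
    (PySem.List.index? ks ((PySem.List.min? ks (fun x => x)).getD 0)).getD 0 = pvArg ks false := by
  match ks with
  | [] => simp [pvArg, PySem.List.index?]
  | k :: r =>
    rw [PySem.List.min?_id_cons]
    show (PySem.List.index? (k :: r) (r.foldl min k)).getD 0 = pvArgGo false r 1 0 k
    rw [pvArgGo_min_eq]
    have hle : r.foldl min k ≤ k := (PySem.List.foldl_min_le r k).1
    by_cases h2 : r.foldl min k < k
    · rw [if_pos h2, PySem.List.index?_cons_of_ne r (by omega)]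
      have hmem : r.foldl min k ∈ r := by
        rcases PySem.List.foldl_min_mem r k with h | h
        · omega
        · exact h
      obtain ⟨n, hn⟩ := Option.isSome_iff_exists.1 ((PySem.List.index?_isSome_iff r _).2 hmem)
      rw [hn]; simp; omega
    · have he : r.foldl min k = k := by omega
      rw [if_neg h2, he, PySem.List.index?_cons_self]
      simp

lemma maxWordA_eq (ws : List String) : pvMaxWordA ws = pvSelect 1 ws := by
  simp only [pvMaxWordA, pvSelect, PySem.List.foldl_append_singleton_eq_map, List.nil_append]
  rw [firstMax_eq]
  norm_num [List.getD_eq_getElem?_getD, PySem.List.pyGet?_natCast]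

lemma minWordA_eq (ws : List String) : pvMinWordA ws = pvSelect 2 ws := by
  simp only [pvMinWordA, pvSelect, PySem.List.foldl_append_singleton_eq_map, List.nil_append]
  rw [firstMin_eq]
  norm_num [List.getD_eq_getElem?_getD, PySem.List.pyGet?_natCast]

lemma secondMaxWordA_eq (ws : List String) : pvSecondMaxWordA ws = pvSelect 3 ws := by
  simp only [pvSecondMaxWordA, pvSelect, PySem.List.foldl_append_singleton_eq_map,
    List.nil_append, PySem.List.pySetD_natCast]
  rw [firstMax_eq (ws.map pvOrdFirst),
    firstMax_eq ((ws.map pvOrdFirst).set (pvArg (ws.map pvOrdFirst) true) 0)]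
  norm_num [List.getD_eq_getElem?_getD, PySem.List.pyGet?_natCast]

lemma secondMinWordA_eq (ws : List String) : pvSecondMinWordA ws = pvSelect 4 ws := by
  simp only [pvSecondMinWordA, pvSelect, PySem.List.foldl_append_singleton_eq_map,
    List.nil_append, PySem.List.pySetD_natCast]
  rw [firstMin_eq (ws.map pvOrdFirst),
    firstMin_eq ((ws.map pvOrdFirst).set (pvArg (ws.map pvOrdFirst) false) (PySem.List.len ws + 2))]
  norm_num [List.getD_eq_getElem?_getD, PySem.List.pyGet?_natCast]

-- one step of B's cache loop: after the conditional insert the looked-up value is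
-- pvSelect m ws and the cache invariant is preserved
lemma cacheStep (ws : List String) (cache : PySem.Dict Int String) (m : Int)
    (hinv : ∀ k v, cache.get? k = some v → v = pvSelect k ws) :
    ((if (cache.get? m).isSome then cache else cache.insert m (pvSelect m ws)).getD m ""
        = pvSelect m ws) ∧
    (∀ k v, (if (cache.get? m).isSome then cache
             else cache.insert m (pvSelect m ws)).get? k = some v → v = pvSelect k ws) := by
  by_cases h : (cache.get? m).isSome
  · simp only [if_pos h]
    obtain ⟨v, hv⟩ := Option.isSome_iff_exists.1 h
    refine ⟨?_, hinv⟩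
    rw [PySem.Dict.getD_eq_get?_getD, hv, Option.getD_some]
    exact hinv m v hv
  · simp only [if_neg h]
    constructor
    · rw [PySem.Dict.getD_eq_get?_getD, PySem.Dict.get?_insert_self, Option.getD_some]
    · intro k v hk
      rw [PySem.Dict.get?_insert] at hk
      split at hk
      · next heq => subst heq; exact (Option.some_inj.mp hk).symm
      · exact hinv k v hk

lemma loop_eq (ws : List String) : ∀ (ms : List Int), (5 : Int) ∉ ms →
    ∀ (acc : List String) (cache : PySem.Dict Int String),
    (∀ m v, cache.get? m = some v → v = pvSelect m ws) →
    ms.foldl (fun result i =>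
        if i = 1 then result ++ [pvMaxWordA ws]
        else if i = 2 then result ++ [pvMinWordA ws]
        else if i = 3 then result ++ [pvSecondMaxWordA ws]
        else if i = 4 then result ++ [pvSecondMinWordA ws]
        else if i = 5 then result ++ [pvReversedMaxWordA ws]
        else result) acc
      = (ms.foldl (fun (st : PySem.Dict Int String × List String) m =>
          if 1 ≤ m ∧ m ≤ 5 then
            let cache := if (st.1.get? m).isSome then st.1 else st.1.insert m (pvSelect m ws)
            (cache, st.2 ++ [cache.getD m ""])
          else st) (cache, acc)).2 := by
  intro ms
  induction ms with
  | nil => intro _ acc cache _; rfl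
  | cons i ms ih =>
    intro h5 acc cache hinv
    have h5' : (5 : Int) ∉ ms := fun h => h5 (List.mem_cons_of_mem _ h)
    have hi5 : i ≠ 5 := fun h => h5 (h ▸ List.mem_cons_self)
    simp only [List.foldl_cons]
    by_cases h1 : i = 1
    · subst h1
      rw [if_pos rfl, if_pos (by norm_num)]
      have e : acc ++ [pvMaxWordA ws]
          = acc ++ [(if (cache.get? 1).isSome then cache
                     else cache.insert 1 (pvSelect 1 ws)).getD 1 ""] := by
        rw [maxWordA_eq, (cacheStep ws cache 1 hinv).1]
      rw [e]
      exact ih h5' _ _ (cacheStep ws cache 1 hinv).2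
    by_cases h2 : i = 2
    · subst h2
      rw [if_neg (by norm_num), if_pos rfl, if_pos (by norm_num)]
      have e : acc ++ [pvMinWordA ws]
          = acc ++ [(if (cache.get? 2).isSome then cache
                     else cache.insert 2 (pvSelect 2 ws)).getD 2 ""] := by
        rw [minWordA_eq, (cacheStep ws cache 2 hinv).1]
      rw [e]
      exact ih h5' _ _ (cacheStep ws cache 2 hinv).2
    by_cases h3 : i = 3
    · subst h3
      rw [if_neg (by norm_num), if_neg (by norm_num), if_pos rfl, if_pos (by norm_num)]
      have e : acc ++ [pvSecondMaxWordA ws]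
          = acc ++ [(if (cache.get? 3).isSome then cache
                     else cache.insert 3 (pvSelect 3 ws)).getD 3 ""] := by
        rw [secondMaxWordA_eq, (cacheStep ws cache 3 hinv).1]
      rw [e]
      exact ih h5' _ _ (cacheStep ws cache 3 hinv).2
    by_cases h4 : i = 4
    · subst h4
      rw [if_neg (by norm_num), if_neg (by norm_num), if_neg (by norm_num), if_pos rfl,
        if_pos (by norm_num)]
      have e : acc ++ [pvSecondMinWordA ws]
          = acc ++ [(if (cache.get? 4).isSome then cache
                     else cache.insert 4 (pvSelect 4 ws)).getD 4 ""] := by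
        rw [secondMinWordA_eq, (cacheStep ws cache 4 hinv).1]
      rw [e]
      exact ih h5' _ _ (cacheStep ws cache 4 hinv).2
    · rw [if_neg h1, if_neg h2, if_neg h3, if_neg h4, if_neg hi5,
        if_neg (by omega : ¬ ((1 : Int) ≤ i ∧ i ≤ 5))]
      exact ih h5' _ _ hinv

-- ===== VERDICT (by name: the statement is the Claim_ definition above) =====
theorem wordOutput_spec : Claim_equal_wordOutput := by
  intro numsWord ws numsMethod ms _ hpre
  unfold Spec_wordOutput wordOutput wordOutput_alt
  exact loop_eq ws ms hpre.1 [] PySem.Dict.empty (by intro m v h; simp [PySem.Dict.get?_empty] at h)
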